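-- pv_equiv track=rewrite | github.com/dancb10/ppscu.com | exercies/leetcode/booking/CheaperMorePopularHotel.py | process_reviews
-- ===== SOURCE A (Python) =====
-- def process_reviews(hotels):
--     results = {}
--     cheapestSoFar = hotels[0]
--     for hotel in hotels[1::]:
--         if hotel["price"] < cheapestSoFar["price"]:
--             cheapestSoFar = hotel
--         else:
--             results[hotel["id"]] = cheapestSoFar["id"]
--     return results
-- ===== SOURCE B (Python) =====
-- def process_reviews(hotels):
--     # pass 1: prefix[i] = cheapest hotel among hotels[0..i] (ties keep the earlier)
--     last = hotels[0]
--     prefix = [last]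
--     for h in hotels[1:]:
--         if h["price"] < last["price"]:
--             last = h
--         prefix.append(last)
--     # pass 2: pair each hotel with the cheapest hotel strictly before it
--     results = {}
--     for p, h in zip(prefix, hotels[1:]):
--         if h["price"] >= p["price"]:
--             results[h["id"]] = p["id"]
--     return results
-- ===== Notes on version B (the rewrite author's own statement) =====
-- stated objective: alternative
-- what changed: Replaces A's single fold carrying a mutable cheapest-so-far with a two-pass decomposition: first build a prefix-minimum table, then zip each hotel with the cheapest hotel strictly before it to fill the results dict.
import Mathlib
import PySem

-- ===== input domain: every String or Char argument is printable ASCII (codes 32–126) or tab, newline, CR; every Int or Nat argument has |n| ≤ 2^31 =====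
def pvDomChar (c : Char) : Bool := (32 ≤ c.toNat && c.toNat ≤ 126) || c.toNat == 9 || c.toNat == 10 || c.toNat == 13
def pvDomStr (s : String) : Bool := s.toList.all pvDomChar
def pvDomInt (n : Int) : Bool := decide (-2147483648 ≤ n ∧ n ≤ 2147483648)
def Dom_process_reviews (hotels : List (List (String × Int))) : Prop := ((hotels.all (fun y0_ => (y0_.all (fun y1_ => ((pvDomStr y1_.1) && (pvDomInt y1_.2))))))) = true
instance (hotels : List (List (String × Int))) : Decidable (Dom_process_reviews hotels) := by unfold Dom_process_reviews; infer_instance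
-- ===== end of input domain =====

-- B replaces A's one-pass fold (mutable cheapest-so-far) by a two-pass decomposition:
-- a prefix-minimum table, then a zip of each hotel with the cheapest hotel before it. Same cost.

-- hotel["k"]: first-match lookup in the hotel's association list (total form; Pre_ guarantees the key exists)
def hval (h : List (String × Int)) (k : String) : Int := ((PySem.Dict.mk h).get? k).getD 0

-- ===== PORT A =====
def astep (s : PySem.Dict Int Int × List (String × Int)) (hotel : List (String × Int)) :
    PySem.Dict Int Int × List (String × Int) :=
  if hval hotel "price" < hval s.2 "price" then (s.1, hotel)
  else (s.1.insert (hval hotel "id") (hval s.2 "id"), s.2)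

def process_reviews (hotels : List (List (String × Int))) : List (Int × Int) :=
  match hotels with
  | [] => []          -- hotels[0] raises IndexError in Python; excluded by Pre_
  | h0 :: _ =>
    ((PySem.List.slice hotels (some 1) none).foldl astep (PySem.Dict.empty, h0)).1.items

-- ===== PORT B =====
-- pass 1 of Source B: the loop building the prefix-minimum list (state: prefix list + last)
def bprefix (pre : List (List (String × Int))) (last : List (String × Int)) :
    List (List (String × Int)) → List (List (String × Int))
  | [] => pre
  | h :: t =>
    let cur := if hval h "price" < hval last "price" then h else last
    bprefix (pre ++ [cur]) cur t

-- pass 2 of Source B: the loop body over zip(prefix, hotels[1:])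
def bstep (d : PySem.Dict Int Int) (ph : List (String × Int) × List (String × Int)) :
    PySem.Dict Int Int :=
  if hval ph.2 "price" ≥ hval ph.1 "price" then d.insert (hval ph.2 "id") (hval ph.1 "id") else d

def process_reviews_alt (hotels : List (List (String × Int))) : List (Int × Int) :=
  match hotels with
  | [] => []          -- hotels[0] raises IndexError in Python; excluded by Pre_
  | h0 :: rest =>
    let pre := bprefix [h0] h0 rest
    ((pre.zip rest).foldl bstep PySem.Dict.empty).items

-- ===== PRECONDITION & SPEC =====
def hkey (h : List (String × Int)) (k : String) : Bool := (PySem.Dict.mk h).contains k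
def hprice (h : List (String × Int)) : Int := hval h "price"

-- Pre_ holds exactly where Python A returns: a nonempty list; every "price" key present once the
-- loop runs (length > 1); and "id" present on hotel i and on the first prefix-minimum hotel exactly
-- where the else-branch fires (price_i is at least the minimum price among hotels[0..i-1]).
def Pre_process_reviews (hotels : List (List (String × Int))) : Prop :=
  hotels ≠ [] ∧
  (1 < hotels.length →
    (hotels.all (fun h => hkey h "price")) = true ∧
    ∀ i : Nat, i < hotels.length → 1 ≤ i →
      hprice (hotels.getD i []) ≥ ((hotels.take i).map hprice).min?.getD 0 →
      (hkey (hotels.getD i []) "id" &&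
       hkey (((hotels.take i).filter
          (fun h => hprice h = ((hotels.take i).map hprice).min?.getD 0)).headD []) "id") = true)
instance (hotels : List (List (String × Int))) : Decidable (Pre_process_reviews hotels) := by
  unfold Pre_process_reviews; infer_instance

def pvWitness_process_reviews : (List (List (String × Int))) :=
  [[("id", 1), ("price", 5)], [("id", 2), ("price", 7)], [("id", 3), ("price", 4)]]

def Spec_process_reviews (hotels : List (List (String × Int))) (out : List (Int × Int)) : Prop := out = process_reviews_alt hotels
instance (hotels : List (List (String × Int))) (out : List (Int × Int)) : Decidable (Spec_process_reviews hotels out) := by unfold Spec_process_reviews; infer_instance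

-- ===== CLAIM (what is proved, stated in full; the proofs are below) =====
def Claim_equal_process_reviews : Prop := ∀ (hotels : List (List (String × Int))), Dom_process_reviews hotels → Pre_process_reviews hotels → Spec_process_reviews hotels (process_reviews hotels)

-- ===== LEMMAS AND PROOFS =====

-- the prefix accumulator is pure accumulation
theorem bprefix_append (t : List (List (String × Int))) :
    ∀ pre last, bprefix pre last t = pre ++ bprefix [] last t := by
  induction t with
  | nil => intro pre last; simp [bprefix]
  | cons h t ih =>
      intro pre last
      simp only [bprefix]
      rw [ih, ih]
      simp only [List.append_assoc, List.nil_append, List.append_cancel_left_eq]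
      conv_rhs => rw [ih]

-- structural unfolding of the prefix-minimum list started at c
theorem bprefix_cons (c h : List (String × Int)) (t : List (List (String × Int))) :
    bprefix [c] c (h :: t) =
      c :: bprefix [if hval h "price" < hval c "price" then h else c]
             (if hval h "price" < hval c "price" then h else c) t := by
  simp only [bprefix]
  rw [bprefix_append, bprefix_append]
  simp only [List.nil_append, List.cons_append]
  conv_rhs => rw [bprefix_append]
  simp

-- main invariant: A's fold over the tail = B's fold over zip(prefix, tail)
theorem main_inv (t : List (List (String × Int))) :
    ∀ (c : List (String × Int)) (d : PySem.Dict Int Int),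
      (t.foldl astep (d, c)).1 = ((bprefix [c] c t).zip t).foldl bstep d := by
  induction t with
  | nil => intro c d; simp [bprefix]
  | cons h t ih =>
      intro c d
      rw [bprefix_cons, List.zip_cons_cons, List.foldl_cons, List.foldl_cons, ih]
      by_cases hc : hval h "price" < hval c "price"
      · simp [astep, bstep, hc, not_le.mpr hc]
      · simp [astep, bstep, hc, not_lt.mp hc]

-- ===== VERDICT (by name: the statement is the Claim_ definition above) =====
theorem process_reviews_spec : Claim_equal_process_reviews := by
  intro hotels _ _
  unfold Spec_process_reviews
  match hotels with
  | [] => rfl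
  | h0 :: rest =>
      simp only [process_reviews, process_reviews_alt, PySem.List.slice_from_one, List.tail_cons]
      rw [main_inv]
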